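-- pv_equiv track=rewrite | github.com/NicovincX2/Python-3.5 | Divers/decoupe_tissu.py | decoupageRuban
-- ===== SOURCE A (Python) =====
-- def decoupageRuban(a,v,n,L):
--     M=[0]*(L+1)
--     D=[-1]*(L+1)
--     for x in range(1,L+1):
--         for i in range(n):
--             if a[i]<=x:
--                 Mi=v[i]+M[x-a[i]]
--                 if Mi>M[x]:
--                     M[x]=Mi;D[x]=i
--     x=L;decoupe=[]
--     while D[x]>=0:
--         decoupe.append(D[x])
--         x -= a[D[x]]
--     return decoupe
-- ===== SOURCE B (Python) =====
-- def decoupageRuban(a, v, n, L):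
--     # Same DP values, but no parent table: reconstruct by rescanning M.
--     M = [0]
--     for x in range(1, L + 1):
--         M.append(max([0] + [v[i] + M[x - a[i]] for i in range(n) if a[i] <= x]))
--     decoupe = []
--     x = L
--     while M[x] > 0:
--         i = next(i for i in range(n) if a[i] <= x and v[i] + M[x - a[i]] == M[x])
--         decoupe.append(i)
--         x -= a[i]
--     return decoupe
-- ===== Notes on version B (the rewrite author's own statement) =====
-- stated objective: simpler
-- what changed: B keeps the same forward DP for the value table M but drops A's parent array D entirely, reconstructing the cut by rescanning M (while M[x]>0, take the first index i with a[i]<=x and v[i]+M[x-a[i]]==M[x]); the table build itself becomes an append/max comprehension instead of A's in-place running-max with parent bookkeeping.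
-- outside the precondition, e.g. on decoupageRuban([0], [0], 1, 1): A returns [], B raises IndexError; on decoupageRuban([0, 1], [0, 5], 2, 1): A returns [1], B raises IndexError
import Mathlib
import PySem

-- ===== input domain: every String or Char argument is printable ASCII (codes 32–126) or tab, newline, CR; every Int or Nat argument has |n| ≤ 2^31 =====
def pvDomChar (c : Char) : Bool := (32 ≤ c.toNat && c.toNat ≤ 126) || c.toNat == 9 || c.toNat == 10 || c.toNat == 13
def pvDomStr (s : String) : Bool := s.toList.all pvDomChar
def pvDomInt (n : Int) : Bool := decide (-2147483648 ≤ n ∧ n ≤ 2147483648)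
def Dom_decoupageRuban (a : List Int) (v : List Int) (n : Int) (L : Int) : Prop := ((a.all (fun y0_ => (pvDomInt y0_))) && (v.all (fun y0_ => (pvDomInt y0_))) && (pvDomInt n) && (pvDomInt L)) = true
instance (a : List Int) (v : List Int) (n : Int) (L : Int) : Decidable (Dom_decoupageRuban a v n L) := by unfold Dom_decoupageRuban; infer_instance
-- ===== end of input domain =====

-- B drops A's parent table D and reconstructs the cut by rescanning the value table M;
-- objective: simpler (same DP values, no second table). Same return value on Pre_.

-- ===== PORT A =====
-- inner body of A's double loop: one candidate i at ribbon length x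
def pvA_step (a v : List Int) (x : Int) (MD : List Int × List Int) (i : Int) : List Int × List Int :=
  if PySem.List.pyGetD a i 0 ≤ x then
    if PySem.List.pyGetD MD.1 x 0 <
        PySem.List.pyGetD v i 0 + PySem.List.pyGetD MD.1 (x - PySem.List.pyGetD a i 0) 0 then
      (MD.1.set x.toNat (PySem.List.pyGetD v i 0 + PySem.List.pyGetD MD.1 (x - PySem.List.pyGetD a i 0) 0),
       MD.2.set x.toNat i)
    else MD
  else MD

-- A's reconstruction: while D[x]>=0: append D[x]; x -= a[D[x]]  (fuel makes it total; L+1 iterations suffice on Pre_)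
def pvA_loop (a D : List Int) : Nat → Int → List Int → List Int
  | 0, _, acc => acc
  | f+1, x, acc =>
    if 0 ≤ PySem.List.pyGetD D x (-1) then
      pvA_loop a D f (x - PySem.List.pyGetD a (PySem.List.pyGetD D x (-1)) 0)
        (acc ++ [PySem.List.pyGetD D x (-1)])
    else acc

def decoupageRuban (a : List Int) (v : List Int) (n : Int) (L : Int) : List Int :=
  let MD := (PySem.List.pyRange 1 (L+1)).foldl
    (fun MD x => (PySem.List.pyRange 0 n).foldl (pvA_step a v x) MD)
    (List.replicate (L+1).toNat 0, List.replicate (L+1).toNat (-1))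
  pvA_loop a MD.2 (L.toNat + 1) L []

-- ===== PORT B =====
-- B's candidate list [v[i]+M[x-a[i]] for i in range(n) if a[i]<=x]
def pvB_cands (a v M : List Int) (n x : Int) : List Int :=
  ((PySem.List.pyRange 0 n).filter (fun i => decide (PySem.List.pyGetD a i 0 ≤ x))).map
    (fun i => PySem.List.pyGetD v i 0 + PySem.List.pyGetD M (x - PySem.List.pyGetD a i 0) 0)

-- next(i for i in range(n) if a[i]<=x and v[i]+M[x-a[i]]==M[x])  (-1 never reached on Pre_ when M[x]>0)
def pvB_find (a v M : List Int) (n x : Int) : Int :=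
  ((PySem.List.pyRange 0 n).find? (fun i => decide (PySem.List.pyGetD a i 0 ≤ x ∧
      PySem.List.pyGetD v i 0 + PySem.List.pyGetD M (x - PySem.List.pyGetD a i 0) 0 =
      PySem.List.pyGetD M x 0))).getD (-1)

-- B's reconstruction: while M[x] > 0: i = first fitting index explaining M[x]; append i; x -= a[i]
def pvB_loop (a v M : List Int) (n : Int) : Nat → Int → List Int → List Int
  | 0, _, acc => acc
  | f+1, x, acc =>
    if 0 < PySem.List.pyGetD M x 0 then
      pvB_loop a v M n f (x - PySem.List.pyGetD a (pvB_find a v M n x) 0)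
        (acc ++ [pvB_find a v M n x])
    else acc

def decoupageRuban_alt (a : List Int) (v : List Int) (n : Int) (L : Int) : List Int :=
  let M := (PySem.List.pyRange 1 (L+1)).foldl
    (fun M x => M ++ [(PySem.List.max? ((0:Int) :: pvB_cands a v M n x) (fun y => y)).getD 0]) [0]
  pvB_loop a v M n (L.toNat + 1) L []

-- ===== PRECONDITION & SPEC =====
-- Pre_ excludes inputs with L < 0 or (when L ≥ 1) n beyond the lists' length or a non-positive
-- piece length among a[0:n]; there A raises (IndexError) or loops forever, except for some
-- zero/negative-length pieces whose value never improves the table, where A still returns but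
-- B's natural candidate comprehension raises an IndexError of its own.
def Pre_decoupageRuban (a : List Int) (v : List Int) (n : Int) (L : Int) : Prop :=
  0 ≤ L ∧ (1 ≤ L → n.toNat ≤ a.length ∧ n.toNat ≤ v.length ∧ ∀ p ∈ a.take n.toNat, 1 ≤ p)
instance (a : List Int) (v : List Int) (n : Int) (L : Int) : Decidable (Pre_decoupageRuban a v n L) := by
  unfold Pre_decoupageRuban; infer_instance
def pvWitness_decoupageRuban : List Int × List Int × Int × Int := ([2, 3], [3, 5], 2, 7)

def Spec_decoupageRuban (a : List Int) (v : List Int) (n : Int) (L : Int) (out : List Int) : Prop := out = decoupageRuban_alt a v n L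
instance (a : List Int) (v : List Int) (n : Int) (L : Int) (out : List Int) : Decidable (Spec_decoupageRuban a v n L out) := by unfold Spec_decoupageRuban; infer_instance

-- ===== CLAIM (what is proved, stated in full; the proofs are below) =====
def Claim_equal_decoupageRuban : Prop := ∀ (a : List Int) (v : List Int) (n : Int) (L : Int), Dom_decoupageRuban a v n L → Pre_decoupageRuban a v n L → Spec_decoupageRuban a v n L (decoupageRuban a v n L)

-- ===== LEMMAS AND PROOFS =====

-- reference value table, built length by length (B's table, in recursive form)
def pvMB (a v : List Int) (n : Int) : Nat → List Int
  | 0 => [(0:Int)]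
  | t+1 => pvMB a v n t ++ [(pvB_cands a v (pvMB a v n t) n ((t:Int)+1)).foldl max 0]

-- A's state after processing lengths 1..t (table size LN+1)
def pvAt (a v : List Int) (n : Int) (LN : Nat) : Nat → List Int × List Int
  | 0 => (List.replicate (LN+1) (0:Int), List.replicate (LN+1) (-1:Int))
  | t+1 => (PySem.List.pyRange 0 n).foldl (pvA_step a v ((t:Int)+1)) (pvAt a v n LN t)

lemma pvMB_length (a v : List Int) (n : Int) : ∀ t : Nat, (pvMB a v n t).length = t + 1 := by
  intro t
  induction t with
  | zero => rfl
  | succ t ih => simp [pvMB, ih]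

lemma pvMB_stable (a v : List Int) (n : Int) : ∀ (T t : Nat), t ≤ T → ∀ y : Nat, y ≤ t →
    (pvMB a v n T).getD y 0 = (pvMB a v n t).getD y 0 := by
  intro T
  induction T with
  | zero => intro t h y hy; interval_cases t; rfl
  | succ T ih =>
    intro t h y hy
    rcases Nat.lt_or_ge t (T+1) with h1 | h1
    · have ht : t ≤ T := by omega
      rw [← ih t ht y hy]
      show (pvMB a v n T ++ _).getD y 0 = _
      rw [List.getD_append]
      rw [pvMB_length]; omega
    · have : t = T+1 := by omega
      subst this; rfl

lemma pvB_build_eq (a v : List Int) (n : Int) : ∀ t : Nat,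
    ((PySem.List.pyRange 1 ((t:Int)+1)).foldl
      (fun M x => M ++ [(PySem.List.max? ((0:Int) :: pvB_cands a v M n x) (fun y => y)).getD 0]) [(0:Int)])
      = pvMB a v n t := by
  intro t
  induction t with
  | zero => rfl
  | succ t ih =>
    have hb : (1:Int) ≤ (t:Int)+1 := by omega
    have : ((t+1:Nat):Int)+1 = ((t:Int)+1)+1 := by push_cast; ring
    rw [this, PySem.List.pyRange_one_succ_right hb, List.foldl_append, ih]
    simp [pvMB, PySem.List.max?_id_cons]

lemma pvAt_eq_fold (a v : List Int) (n : Int) (LN : Nat) : ∀ t : Nat,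
    ((PySem.List.pyRange 1 ((t:Int)+1)).foldl
      (fun MD x => (PySem.List.pyRange 0 n).foldl (pvA_step a v x) MD)
      (List.replicate (LN+1) (0:Int), List.replicate (LN+1) (-1:Int)))
      = pvAt a v n LN t := by
  intro t
  induction t with
  | zero => rfl
  | succ t ih =>
    have hb : (1:Int) ≤ (t:Int)+1 := by omega
    have : ((t+1:Nat):Int)+1 = ((t:Int)+1)+1 := by push_cast; ring
    rw [this, PySem.List.pyRange_one_succ_right hb, List.foldl_append, ih]
    rfl

-- value of candidate piece i at length x, reading table M
def pvCand (a v M : List Int) (x i : Int) : Int :=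
  PySem.List.pyGetD v i 0 + PySem.List.pyGetD M (x - PySem.List.pyGetD a i 0) 0

-- scalar view of A's inner loop at length x: a running (best value, best index) pair over a FIXED table M
def pvPair (a v M : List Int) (x : Int) (is : List Int) (cd : Int × Int) : Int × Int :=
  is.foldl (fun cd i =>
    if PySem.List.pyGetD a i 0 ≤ x then
      (if cd.1 < pvCand a v M x i then (pvCand a v M x i, i) else cd)
    else cd) cd

lemma pvPair_cons (a v M : List Int) (x i : Int) (is : List Int) (cd : Int × Int) :
    pvPair a v M x (i :: is) cd =
      pvPair a v M x is (if PySem.List.pyGetD a i 0 ≤ x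
        then (if cd.1 < pvCand a v M x i then (pvCand a v M x i, i) else cd) else cd) := rfl

lemma pvPair_inv (a v M : List Int) (x : Int) : ∀ (is : List Int) (c d : Int),
    c ≤ (pvPair a v M x is (c,d)).1
    ∧ (pvPair a v M x is (c,d)).1 =
        is.foldl (fun m i => if PySem.List.pyGetD a i 0 ≤ x then max m (pvCand a v M x i) else m) c
    ∧ ((pvPair a v M x is (c,d)).1 = c → (pvPair a v M x is (c,d)).2 = d)
    ∧ (c < (pvPair a v M x is (c,d)).1 →
        is.find? (fun i => decide (PySem.List.pyGetD a i 0 ≤ x ∧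
            pvCand a v M x i = (pvPair a v M x is (c,d)).1)) = some (pvPair a v M x is (c,d)).2) := by
  intro is
  induction is with
  | nil =>
    intro c d
    refine ⟨le_refl _, rfl, fun _ => rfl, fun h => absurd h (by simp [pvPair])⟩
  | cons i is ih =>
    intro c d
    by_cases hax : PySem.List.pyGetD a i 0 ≤ x
    · by_cases himp : c < pvCand a v M x i
      · have hstep : pvPair a v M x (i :: is) (c,d) = pvPair a v M x is (pvCand a v M x i, i) := by
          rw [pvPair_cons, if_pos hax, if_pos himp]
        obtain ⟨h1, h2, h3, h4⟩ := ih (pvCand a v M x i) i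
        rw [hstep]
        refine ⟨by omega, ?_, ?_, ?_⟩
        · rw [h2, List.foldl_cons, if_pos hax, max_eq_right (le_of_lt himp)]
        · intro h; omega
        · intro _
          by_cases heq : (pvPair a v M x is (pvCand a v M x i, i)).1 = pvCand a v M x i
          · have hd : (pvPair a v M x is (pvCand a v M x i, i)).2 = i := h3 heq
            rw [List.find?_cons_of_pos (by simp [hax, heq]), hd]
          · have hlt : pvCand a v M x i < (pvPair a v M x is (pvCand a v M x i, i)).1 :=
              lt_of_le_of_ne h1 (fun h => heq h.symm)
            rw [List.find?_cons_of_neg (by simp; intro _; omega)]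
            exact h4 hlt
      · have hstep : pvPair a v M x (i :: is) (c,d) = pvPair a v M x is (c, d) := by
          rw [pvPair_cons, if_pos hax, if_neg himp]
        obtain ⟨h1, h2, h3, h4⟩ := ih c d
        rw [hstep]
        refine ⟨h1, ?_, h3, ?_⟩
        · rw [h2, List.foldl_cons, if_pos hax, max_eq_left (by omega)]
        · intro hlt
          rw [List.find?_cons_of_neg (by simp; intro _; omega)]
          exact h4 hlt
    · have hstep : pvPair a v M x (i :: is) (c,d) = pvPair a v M x is (c, d) := by
        rw [pvPair_cons, if_neg hax]
      obtain ⟨h1, h2, h3, h4⟩ := ih c d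
      rw [hstep]
      refine ⟨h1, ?_, h3, ?_⟩
      · rw [h2, List.foldl_cons, if_neg hax]
      · intro hlt
        rw [List.find?_cons_of_neg (by simp [hax])]
        exact h4 hlt

lemma pvPair_congr (a v M M' : List Int) (x : Int) (is : List Int) (cd : Int × Int)
    (h : ∀ i ∈ is, PySem.List.pyGetD a i 0 ≤ x → pvCand a v M x i = pvCand a v M' x i) :
    pvPair a v M x is cd = pvPair a v M' x is cd := by
  unfold pvPair
  apply PySem.List.foldl_congr_mem
  intro acc i hi
  by_cases hax : PySem.List.pyGetD a i 0 ≤ x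
  · simp only [hax, if_true, h i hi hax]
  · simp [hax]

lemma pvA_inner_eq (a v M D : List Int) (x : Int) (hx : 0 ≤ x)
    (hxM : x.toNat < M.length) (is : List Int)
    (hAll : ∀ i ∈ is, PySem.List.pyGetD a i 0 ≤ x → 1 ≤ PySem.List.pyGetD a i 0) :
    ∀ c d : Int, is.foldl (pvA_step a v x) (M.set x.toNat c, D.set x.toNat d)
      = (M.set x.toNat (pvPair a v M x is (c,d)).1, D.set x.toNat (pvPair a v M x is (c,d)).2) := by
  induction is with
  | nil => intro c d; rfl
  | cons i is ih =>
    intro c d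
    have hmem : i ∈ i :: is := List.mem_cons_self
    have hAll' : ∀ j ∈ is, PySem.List.pyGetD a j 0 ≤ x → 1 ≤ PySem.List.pyGetD a j 0 :=
      fun j hj => hAll j (List.mem_cons_of_mem _ hj)
    rw [List.foldl_cons, pvPair_cons]
    by_cases hax : PySem.List.pyGetD a i 0 ≤ x
    · have hai : 1 ≤ PySem.List.pyGetD a i 0 := hAll i hmem hax
      have hMx : PySem.List.pyGetD (M.set x.toNat c) x 0 = c := by
        rw [PySem.List.pyGetD_of_nonneg _ _ hx]
        simp [List.getD, (by simpa using hxM : x.toNat < M.length)]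
      have hne : x.toNat ≠ (x - PySem.List.pyGetD a i 0).toNat := by omega
      have hMr : PySem.List.pyGetD (M.set x.toNat c) (x - PySem.List.pyGetD a i 0) 0
          = PySem.List.pyGetD M (x - PySem.List.pyGetD a i 0) 0 := by
        rw [PySem.List.pyGetD_of_nonneg (M.set x.toNat c) (i := x - PySem.List.pyGetD a i 0) 0 (by omega),
           PySem.List.pyGetD_of_nonneg M (i := x - PySem.List.pyGetD a i 0) 0 (by omega)]
        simp [List.getD, List.getElem?_set_ne hne]
      simp only [pvA_step, hMx, hMr, if_pos hax]
      by_cases himp : c < pvCand a v M x i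
      · rw [if_pos (by simpa [pvCand] using himp), if_pos (by simpa using himp)]
        rw [List.set_set, List.set_set]
        exact ih hAll' (pvCand a v M x i) i
      · rw [if_neg (by simpa [pvCand] using himp), if_neg (by simpa using himp)]
        exact ih hAll' c d
    · simp only [pvA_step, if_neg hax]
      exact ih hAll' c d

lemma pvPair_fst_eq_fm (a v M : List Int) (n x : Int) :
    (pvPair a v M x (PySem.List.pyRange 0 n) (0,-1)).1 = (pvB_cands a v M n x).foldl max 0 := by
  obtain ⟨-, h2, -, -⟩ := pvPair_inv a v M x (PySem.List.pyRange 0 n) 0 (-1)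
  rw [h2, pvB_cands, List.foldl_map, ← PySem.List.foldl_ite_eq_foldl_filter]
  simp [pvCand]

-- pvPair at x = t+1 reads the table only at 0..t, so prefixes and stable tables interchange
lemma pvPair_read_prefix (a v : List Int) (n : Int) (LN t : Nat) (ht : t ≤ LN)
    (hAll : ∀ i ∈ PySem.List.pyRange 0 n, 1 ≤ PySem.List.pyGetD a i 0) (tail : List Int)
    (cd : Int × Int) :
    pvPair a v (pvMB a v n t ++ tail) ((t:Int)+1) (PySem.List.pyRange 0 n) cd
      = pvPair a v (pvMB a v n LN) ((t:Int)+1) (PySem.List.pyRange 0 n) cd := by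
  apply pvPair_congr
  intro i hi hax
  have hai := hAll i hi
  unfold pvCand
  have h0 : (0:Int) ≤ (t:Int)+1 - PySem.List.pyGetD a i 0 := by omega
  rw [PySem.List.pyGetD_of_nonneg (pvMB a v n t ++ tail) (i := (t:Int)+1 - PySem.List.pyGetD a i 0) 0 h0,
      PySem.List.pyGetD_of_nonneg (pvMB a v n LN) (i := (t:Int)+1 - PySem.List.pyGetD a i 0) 0 h0]
  have hj : ((t:Int)+1 - PySem.List.pyGetD a i 0).toNat ≤ t := by omega
  rw [List.getD_append _ _ _ _ (by rw [pvMB_length]; omega),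
      pvMB_stable a v n LN t ht _ hj]

lemma pvMB_char (a v : List Int) (n : Int) (LN : Nat)
    (hAll : ∀ i ∈ PySem.List.pyRange 0 n, 1 ≤ PySem.List.pyGetD a i 0) :
    ∀ y : Nat, 1 ≤ y → y ≤ LN →
      (pvMB a v n LN).getD y 0 =
        (pvPair a v (pvMB a v n LN) (y:Int) (PySem.List.pyRange 0 n) (0,-1)).1 := by
  intro y hy1 hy2
  obtain ⟨s, rfl⟩ : ∃ s, y = s + 1 := ⟨y - 1, by omega⟩
  have hs : s ≤ LN := by omega
  rw [pvMB_stable a v n LN (s+1) (by omega) (s+1) le_rfl]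
  show (pvMB a v n s ++ [(pvB_cands a v (pvMB a v n s) n ((s:Int)+1)).foldl max 0]).getD (s+1) 0 = _
  rw [List.getD_append_right _ _ _ _ (by rw [pvMB_length])]
  rw [pvMB_length]
  simp only [Nat.sub_self, List.getD_cons_zero]
  rw [← pvPair_fst_eq_fm]
  have hcast : ((s+1:Nat):Int) = (s:Int)+1 := by push_cast; ring
  rw [hcast, ← pvPair_read_prefix a v n LN s hs hAll [] (0,-1)]
  rw [List.append_nil]

lemma pvAt_inv (a v : List Int) (n : Int) (LN : Nat)
    (hAll : ∀ i ∈ PySem.List.pyRange 0 n, 1 ≤ PySem.List.pyGetD a i 0) :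
    ∀ t : Nat, t ≤ LN →
      (pvAt a v n LN t).1 = pvMB a v n t ++ List.replicate (LN - t) 0
      ∧ (pvAt a v n LN t).2.length = LN + 1
      ∧ (∀ y : Nat, t < y → (pvAt a v n LN t).2.getD y (-1) = -1)
      ∧ (pvAt a v n LN t).2.getD 0 (-1) = -1
      ∧ (∀ y : Nat, 1 ≤ y → y ≤ t →
          (pvAt a v n LN t).2.getD y (-1) =
            (pvPair a v (pvMB a v n LN) (y:Int) (PySem.List.pyRange 0 n) (0,-1)).2) := by
  intro t
  induction t with
  | zero =>
    intro _
    refine ⟨?_, by simp [pvAt], ?_, ?_, by omega⟩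
    · show List.replicate (LN+1) (0:Int) = [(0:Int)] ++ List.replicate LN 0
      simp [List.replicate_succ]
    · intro y _
      show (List.replicate (LN+1) (-1:Int)).getD y (-1) = -1
      simp [List.getD_eq_getElem?_getD, List.getElem?_replicate]
      split <;> rfl
    · show (List.replicate (LN+1) (-1:Int)).getD 0 (-1) = -1
      simp [List.getD_eq_getElem?_getD]
  | succ t ih =>
    intro ht1
    obtain ⟨hM, hDlen, hDhi, hD0, hDch⟩ := ih (by omega)
    set x : Int := (t:Int)+1 with hxdef
    have hx0 : (0:Int) ≤ x := by omega
    have hxt : x.toNat = t+1 := by omega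
    have hMlen : (pvAt a v n LN t).1.length = LN + 1 := by
      rw [hM, List.length_append, pvMB_length, List.length_replicate]; omega
    have hxM : x.toNat < (pvAt a v n LN t).1.length := by omega
    -- the slot x is still 0 / -1 before step t+1
    have hMslot : (pvAt a v n LN t).1.set x.toNat (0:Int) = (pvAt a v n LN t).1 := by
      apply List.ext_getElem?
      intro j
      rcases eq_or_ne j x.toNat with rfl | hj
      · rw [List.getElem?_set_self (by omega)]
        rw [hM, List.getElem?_append_right (by rw [pvMB_length]; omega), List.getElem?_replicate]
        rw [pvMB_length, hxt, Nat.sub_self, if_pos (by omega)]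
      · rw [List.getElem?_set_ne (Ne.symm hj)]
    have hDslot : (pvAt a v n LN t).2.set x.toNat (-1:Int) = (pvAt a v n LN t).2 := by
      apply List.ext_getElem?
      intro j
      rcases eq_or_ne j x.toNat with rfl | hj
      · rw [List.getElem?_set_self (by omega)]
        obtain ⟨z, hz⟩ : ∃ z, (pvAt a v n LN t).2[x.toNat]? = some z :=
          ⟨_, List.getElem?_eq_getElem (by omega)⟩
        rw [hz]
        have hzd := hDhi (t+1) (by omega)
        rw [List.getD_eq_getElem?_getD, ← hxt, hz] at hzd
        simp at hzd
        rw [hzd]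
      · rw [List.getElem?_set_ne (Ne.symm hj)]
    have hAll' : ∀ i ∈ PySem.List.pyRange 0 n, PySem.List.pyGetD a i 0 ≤ x → 1 ≤ PySem.List.pyGetD a i 0 :=
      fun i hi _ => hAll i hi
    have hstep : pvAt a v n LN (t+1)
        = ((pvAt a v n LN t).1.set x.toNat
            (pvPair a v (pvAt a v n LN t).1 x (PySem.List.pyRange 0 n) (0,-1)).1,
           (pvAt a v n LN t).2.set x.toNat
            (pvPair a v (pvAt a v n LN t).1 x (PySem.List.pyRange 0 n) (0,-1)).2) := by
      show (PySem.List.pyRange 0 n).foldl (pvA_step a v x) (pvAt a v n LN t) = _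
      conv_lhs => rw [← Prod.mk.eta (p := pvAt a v n LN t), ← hMslot, ← hDslot]
      exact pvA_inner_eq a v (pvAt a v n LN t).1 (pvAt a v n LN t).2 x hx0 hxM
        (PySem.List.pyRange 0 n) hAll' 0 (-1)
    have hPfull : pvPair a v (pvAt a v n LN t).1 x (PySem.List.pyRange 0 n) (0,-1)
        = pvPair a v (pvMB a v n LN) x (PySem.List.pyRange 0 n) (0,-1) := by
      rw [hM]; exact pvPair_read_prefix a v n LN t (by omega) hAll _ (0,-1)
    have hPt : pvPair a v (pvAt a v n LN t).1 x (PySem.List.pyRange 0 n) (0,-1)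
        = pvPair a v (pvMB a v n t ++ []) x (PySem.List.pyRange 0 n) (0,-1) := by
      rw [hM, pvPair_read_prefix a v n LN t (by omega) hAll _ (0,-1),
          pvPair_read_prefix a v n LN t (by omega) hAll [] (0,-1)]
    refine ⟨?_, ?_, ?_, ?_, ?_⟩
    · -- M component
      rw [hstep]
      show (pvAt a v n LN t).1.set x.toNat _ = _
      rw [hPt, List.append_nil, pvPair_fst_eq_fm, hM]
      rw [List.set_append]
      rw [if_neg (by rw [pvMB_length]; omega)]
      have hrep : List.replicate (LN - t) (0:Int) = (0:Int) :: List.replicate (LN - (t+1)) 0 := by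
        have : LN - t = (LN - (t+1)) + 1 := by omega
        rw [this, List.replicate_succ]
      rw [hrep]
      show pvMB a v n t ++ ((0:Int) :: List.replicate (LN - (t+1)) 0).set (x.toNat - (pvMB a v n t).length) _ = _
      rw [pvMB_length, hxt, Nat.sub_self]
      show pvMB a v n t ++ (_ :: List.replicate (LN - (t+1)) 0) = _
      show _ = (pvMB a v n t ++ [(pvB_cands a v (pvMB a v n t) n ((t:Int)+1)).foldl max 0]) ++ List.replicate (LN - (t+1)) 0
      rw [List.append_assoc]
      rfl
    · rw [hstep]; simpa using hDlen
    · intro y hy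
      rw [hstep]
      show ((pvAt a v n LN t).2.set x.toNat _).getD y (-1) = -1
      rw [List.getD_eq_getElem?_getD, List.getElem?_set_ne (by omega), ← List.getD_eq_getElem?_getD]
      exact hDhi y (by omega)
    · rw [hstep]
      show ((pvAt a v n LN t).2.set x.toNat _).getD 0 (-1) = -1
      rw [List.getD_eq_getElem?_getD, List.getElem?_set_ne (by omega), ← List.getD_eq_getElem?_getD]
      exact hD0
    · intro y hy1 hy2
      rw [hstep]
      show ((pvAt a v n LN t).2.set x.toNat _).getD y (-1) = _
      rcases Nat.lt_or_ge y (t+1) with hlt | hge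
      · rw [List.getD_eq_getElem?_getD, List.getElem?_set_ne (by omega), ← List.getD_eq_getElem?_getD]
        exact hDch y hy1 (by omega)
      · have hyx : y = t+1 := by omega
        subst hyx
        rw [List.getD_eq_getElem?_getD, ← hxt, List.getElem?_set_self (by omega)]
        show (pvPair a v (pvAt a v n LN t).1 x (PySem.List.pyRange 0 n) (0,-1)).2 = _
        rw [hPfull]
        have hcast : ((x.toNat:Nat):Int) = x := by omega
        rw [hcast]

lemma pvLoops_eq (a v MB D : List Int) (n : Int) (LN : Nat)
    (hch : ∀ y : Nat, y ≤ LN →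
      (0 ≤ D.getD y (-1) ↔ 0 < MB.getD y 0) ∧
      (0 < MB.getD y 0 → D.getD y (-1) = pvB_find a v MB n (y:Int)
        ∧ 1 ≤ PySem.List.pyGetD a (D.getD y (-1)) 0
        ∧ PySem.List.pyGetD a (D.getD y (-1)) 0 ≤ (y:Int))) :
    ∀ (f : Nat) (x : Int) (acc : List Int), 0 ≤ x → x ≤ (LN:Int) →
      pvA_loop a D f x acc = pvB_loop a v MB n f x acc := by
  intro f
  induction f with
  | zero => intro x acc _ _; rfl
  | succ f ih =>
    intro x acc hx0 hxL
    have hcast : ((x.toNat : Nat) : Int) = x := by omega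
    have hyL : x.toNat ≤ LN := by omega
    obtain ⟨hiff, himp⟩ := hch x.toNat hyL
    rw [hcast] at himp
    have hDx : PySem.List.pyGetD D x (-1) = D.getD x.toNat (-1) := by
      rw [PySem.List.pyGetD_of_nonneg D (-1) hx0]
    have hMx : PySem.List.pyGetD MB x 0 = MB.getD x.toNat 0 := by
      rw [PySem.List.pyGetD_of_nonneg MB 0 hx0]
    show (if 0 ≤ PySem.List.pyGetD D x (-1) then
        pvA_loop a D f (x - PySem.List.pyGetD a (PySem.List.pyGetD D x (-1)) 0)
          (acc ++ [PySem.List.pyGetD D x (-1)])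
      else acc) =
      (if 0 < PySem.List.pyGetD MB x 0 then
        pvB_loop a v MB n f (x - PySem.List.pyGetD a (pvB_find a v MB n x) 0)
          (acc ++ [pvB_find a v MB n x])
      else acc)
    rw [hDx, hMx]
    by_cases hd : 0 ≤ D.getD x.toNat (-1)
    · have hm : 0 < MB.getD x.toNat 0 := hiff.mp hd
      obtain ⟨hfind, hai1, hai2⟩ := himp hm
      rw [if_pos hd, if_pos hm, ← hfind]
      exact ih _ _ (by omega) (by omega)
    · have hm : ¬ 0 < MB.getD x.toNat 0 := fun h => hd (hiff.mpr h)
      rw [if_neg hd, if_neg hm]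

-- A's parent entry / B's rescans: everything the reconstruction loops need, for a table built to length m
lemma pvChar_all (a v : List Int) (n : Int) (m : Nat)
    (hAll : ∀ i ∈ PySem.List.pyRange 0 n, 1 ≤ PySem.List.pyGetD a i 0) :
    ∀ y : Nat, y ≤ m →
      (0 ≤ (pvAt a v n m m).2.getD y (-1) ↔ 0 < (pvMB a v n m).getD y 0) ∧
      (0 < (pvMB a v n m).getD y 0 →
        (pvAt a v n m m).2.getD y (-1) = pvB_find a v (pvMB a v n m) n (y:Int)
        ∧ 1 ≤ PySem.List.pyGetD a ((pvAt a v n m m).2.getD y (-1)) 0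
        ∧ PySem.List.pyGetD a ((pvAt a v n m m).2.getD y (-1)) 0 ≤ (y:Int)) := by
  obtain ⟨hM, hDlen, hDhi, hD0, hDch⟩ := pvAt_inv a v n m hAll m le_rfl
  intro y hy
  rcases Nat.eq_zero_or_pos y with rfl | hy1
  · have hmb0 : (pvMB a v n m).getD 0 0 = 0 := by
      rw [pvMB_stable a v n m 0 (by omega) 0 le_rfl]; rfl
    rw [hD0, hmb0]
    exact ⟨by constructor <;> intro h <;> omega, fun h => absurd h (by omega)⟩
  · have hDy := hDch y hy1 hy
    have hMy := pvMB_char a v n m hAll y hy1 hy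
    obtain ⟨p1, p2, p3, p4⟩ :=
      pvPair_inv a v (pvMB a v n m) (y:Int) (PySem.List.pyRange 0 n) 0 (-1)
    rw [hDy, hMy]
    set P := pvPair a v (pvMB a v n m) (y:Int) (PySem.List.pyRange 0 n) (0,-1) with hP
    by_cases hpos : 0 < P.1
    · have hfd := p4 hpos
      have hmem := List.mem_of_find?_eq_some hfd
      have hP2n : 0 ≤ P.2 := (PySem.List.mem_pyRange_one.mp hmem).1
      have hprop := List.find?_some hfd
      rw [decide_eq_true_eq] at hprop
      obtain ⟨hale, hcnd⟩ := hprop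
      refine ⟨by constructor <;> intro _ <;> [exact hpos; exact hP2n], fun _ => ⟨?_, hAll _ hmem, hale⟩⟩
      · -- pvB_find's predicate is p4's predicate
        have hpredeq : (fun i => decide (PySem.List.pyGetD a i 0 ≤ (y:Int) ∧
            PySem.List.pyGetD v i 0 +
              PySem.List.pyGetD (pvMB a v n m) ((y:Int) - PySem.List.pyGetD a i 0) 0 =
            PySem.List.pyGetD (pvMB a v n m) (y:Int) 0))
            = (fun i => decide (PySem.List.pyGetD a i 0 ≤ (y:Int) ∧
                pvCand a v (pvMB a v n m) (y:Int) i = P.1)) := by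
          funext i
          rw [pvCand, PySem.List.pyGetD_natCast, hMy]
        rw [pvB_find, hpredeq, hfd, Option.getD_some]
    · have hz : P.1 = 0 := by omega
      have hP2 : P.2 = -1 := p3 hz
      rw [hP2, hz]
      exact ⟨by constructor <;> intro h <;> omega, fun h => absurd h (by omega)⟩

-- ===== VERDICT (by name: the statement is the Claim_ definition above) =====
theorem decoupageRuban_spec : Claim_equal_decoupageRuban := by
  unfold Claim_equal_decoupageRuban
  intro a v n L _ hpre
  obtain ⟨hL0, hrest⟩ := hpre
  unfold Spec_decoupageRuban
  obtain ⟨m, rfl⟩ : ∃ m : Nat, L = (m:Int) := ⟨L.toNat, by omega⟩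
  have ht1 : ((m:Int)+1).toNat = m + 1 := by omega
  have ht2 : ((m:Int)).toNat = m := by omega
  simp only [decoupageRuban, decoupageRuban_alt, ht1, ht2]
  rw [pvAt_eq_fold a v n m m, pvB_build_eq a v n m]
  -- the char facts needed by the two reconstruction loops
  have hch : ∀ y : Nat, y ≤ m →
      (0 ≤ (pvAt a v n m m).2.getD y (-1) ↔ 0 < (pvMB a v n m).getD y 0) ∧
      (0 < (pvMB a v n m).getD y 0 →
        (pvAt a v n m m).2.getD y (-1) = pvB_find a v (pvMB a v n m) n (y:Int)
        ∧ 1 ≤ PySem.List.pyGetD a ((pvAt a v n m m).2.getD y (-1)) 0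
        ∧ PySem.List.pyGetD a ((pvAt a v n m m).2.getD y (-1)) 0 ≤ (y:Int)) := by
    rcases Nat.eq_zero_or_pos m with rfl | hm1
    · intro y hy
      interval_cases y
      refine ⟨by constructor <;> intro h <;> simp_all [pvAt, pvMB], ?_⟩
      intro h
      have : (pvMB a v n 0).getD 0 0 = 0 := rfl
      omega
    · have hAll : ∀ i ∈ PySem.List.pyRange 0 n, 1 ≤ PySem.List.pyGetD a i 0 := by
        intro i hi
        obtain ⟨hi0, hin⟩ := PySem.List.mem_pyRange_one.mp hi
        obtain ⟨hna, hnv, hpos⟩ := hrest (by omega)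
        have hk : i.toNat < n.toNat := by omega
        have hka : i.toNat < a.length := by omega
        rw [PySem.List.pyGetD_of_nonneg a 0 hi0, List.getD_eq_getElem a 0 hka]
        apply hpos
        have : a[i.toNat] = (a.take n.toNat)[i.toNat]'(by simp [hka, hk]) := by
          rw [List.getElem_take]
        rw [this]
        exact List.getElem_mem _
      exact pvChar_all a v n m hAll
  exact pvLoops_eq a v (pvMB a v n m) (pvAt a v n m m).2 n m hch (m+1) (m:Int) [] (by omega) le_rfl
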